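-- pv_equiv track=rewrite | github.com/peterbikes/100_Python_Projects | 100 Python Projects/PODP/podp.py | odd_dig_primes
-- ===== SOURCE A (Python) =====
-- def is_prime(n):
--     if n < 2:
--         return False
--     i = 2
--     while i * i <= n:
--         if n % i == 0:
--             return False
--         i += 1
--     return True
--
-- def is_all_odds(n):
--     number = str(n)
--     for letter in number:
--         if int(letter) % 2 == 0:
--             return False
--     return True
--
-- def podp_counter(n):
--     counter = 0
--     for i in range(2, n+1):
--         if is_prime(i) and is_all_odds(i):
--             counter += 1
--     return counter
--
-- def odd_dig_primes(n):
--     dig_primes = []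
--     below = n
--     above = n + 1
--     dig_primes.append(podp_counter(n))
--     while True:
--         if is_prime(below) and is_all_odds(below):
--             dig_primes.append(below)
--             break
--         below -= 1
--     while True:
--         if is_prime(above) and is_all_odds(above):
--             dig_primes.append(above)
--             break
--         above += 1
--     return dig_primes
-- ===== SOURCE B (Python) =====
-- def odd_dig_primes(n):
--     # One fused upward pass: test the (cheap) all-odd-digits property first, and
--     # trial-divide only by odd factors; 'below' is the last hit of the pass, so the
--     # downward search disappears.
--     def _is_podp(k):
--         if k < 3 or not all(c in '13579' for c in str(k)):
--             return False
--         f = 3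
--         while f * f <= k:
--             if k % f == 0:
--                 return False
--             f += 2
--         return True
--
--     count = 0
--     below = 0
--     for i in range(2, n + 1):
--         if _is_podp(i):
--             count += 1
--             below = i
--     above = n + 1
--     while not _is_podp(above):
--         above += 1
--     return [count, below, above]
-- ===== Notes on version B (the rewrite author's own statement) =====
-- stated objective: faster
-- what changed: B replaces A's three scans (a count loop, a downward 'below' search and an upward 'above' search, each running full trial division before looking at the digits) by one fused upward pass that applies the cheap all-odd-digits filter first, trial-divides by odd candidate factors only, and obtains 'below' as the last hit of the pass, so the downward search disappears.
import Mathlib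
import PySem

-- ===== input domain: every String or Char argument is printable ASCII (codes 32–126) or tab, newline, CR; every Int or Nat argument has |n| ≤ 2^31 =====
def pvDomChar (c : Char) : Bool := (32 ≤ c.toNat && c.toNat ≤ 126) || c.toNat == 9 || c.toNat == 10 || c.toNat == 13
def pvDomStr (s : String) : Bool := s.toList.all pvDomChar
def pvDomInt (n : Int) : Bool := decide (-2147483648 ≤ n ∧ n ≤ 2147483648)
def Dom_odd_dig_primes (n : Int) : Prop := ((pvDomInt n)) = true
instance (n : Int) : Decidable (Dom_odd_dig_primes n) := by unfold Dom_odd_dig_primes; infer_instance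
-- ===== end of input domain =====

-- B fuses A's three scans into one upward pass (digit filter first, odd-factor trial
-- division, 'below' kept as the last hit), measured faster; proved equal for n ≥ 3.


-- ===== PORT A =====
-- is_prime's while loop; fuel: the loop exits no later than i = k+1, so fuel k.toNat+1
-- from i = 2 is always enough (the fuel-0 value is never reached from pvIsPrimeA).
def pvIsPrimeLoopA (k : Int) (i : Int) : Nat → Bool
  | 0 => true
  | f + 1 =>
    if i * i ≤ k then
      (if PySem.Int.mod k i == 0 then false else pvIsPrimeLoopA k (i + 1) f)
    else true

def pvIsPrimeA (k : Int) : Bool :=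
  if k < 2 then false else pvIsPrimeLoopA k 2 (k.toNat + 1)

-- is_all_odds: 'int(letter) % 2 == 0' with int(letter) = ofChars? [c]; the .getD 0 is
-- never reached at A's call sites (k ≥ 2 there, so every letter is a decimal digit).
def pvAllOddsGoA : List Char → Bool
  | [] => true
  | c :: cs =>
    if PySem.Int.mod ((PySem.Int.ofChars? [c]).getD 0) 2 == 0 then false
    else pvAllOddsGoA cs

def pvIsAllOddsA (k : Int) : Bool := pvAllOddsGoA (PySem.Int.toChars k)

def pvPodpCounterA (n : Int) : Int :=
  (PySem.List.pyRange 2 (n + 1) 1).foldl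
    (fun c i => if pvIsPrimeA i && pvIsAllOddsA i then c + 1 else c) 0

-- 'while True: … below -= 1': fuel n.toNat+1 suffices under Pre_ (a hit exists at 3).
def pvSearchDownA : Nat → Int → Int
  | 0, b => b
  | f + 1, b => if pvIsPrimeA b && pvIsAllOddsA b then b else pvSearchDownA f (b - 1)

-- 'while True: … above += 1': generous constant fuel; exhaustion (never reached for
-- the admitted inputs) returns the current counter.
def pvSearchUpA : Nat → Int → Int
  | 0, a => a
  | f + 1, a => if pvIsPrimeA a && pvIsAllOddsA a then a else pvSearchUpA f (a + 1)

def odd_dig_primes (n : Int) : List Int :=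
  [pvPodpCounterA n, pvSearchDownA (n.toNat + 1) n, pvSearchUpA 8589934592 (n + 1)]

-- ===== PORT B =====
-- all(c in '13579' for c in str(k))
def pvIsAllOddsB (k : Int) : Bool :=
  (PySem.Int.toChars k).all (fun c => ['1', '3', '5', '7', '9'].contains c)

-- odd-factor trial division from 3 (same fuel convention as A's loop)
def pvOddFacLoopB (k : Int) (f : Int) : Nat → Bool
  | 0 => true
  | fl + 1 =>
    if f * f ≤ k then
      (if PySem.Int.mod k f == 0 then false else pvOddFacLoopB k (f + 2) fl)
    else true

def pvIsPodpB (k : Int) : Bool :=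
  if k < 3 then false
  else if !pvIsAllOddsB k then false
  else pvOddFacLoopB k 3 (k.toNat + 1)

def pvSearchUpB : Nat → Int → Int
  | 0, a => a
  | f + 1, a => if pvIsPodpB a then a else pvSearchUpB f (a + 1)

def odd_dig_primes_alt (n : Int) : List Int :=
  let st := (PySem.List.pyRange 2 (n + 1) 1).foldl
    (fun (p : Int × Int) i => if pvIsPodpB i then (p.1 + 1, i) else p) (0, 0)
  [st.1, st.2, pvSearchUpB 8589934592 (n + 1)]

-- ===== PRECONDITION & SPEC =====
-- Pre_ excludes n below the smallest all-odd-digit prime: there A's downward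
-- 'below' while-loop never finds a hit and Python A loops forever (no return).
def Pre_odd_dig_primes (n : Int) : Prop := 3 ≤ n
instance (n : Int) : Decidable (Pre_odd_dig_primes n) := by
  unfold Pre_odd_dig_primes; infer_instance

def pvWitness_odd_dig_primes : Int := 10

def Spec_odd_dig_primes (n : Int) (out : List Int) : Prop := out = odd_dig_primes_alt n
instance (n : Int) (out : List Int) : Decidable (Spec_odd_dig_primes n out) := by
  unfold Spec_odd_dig_primes; infer_instance

-- ===== CLAIM (what is proved, stated in full; the proofs are below) =====
def Claim_equal_odd_dig_primes : Prop :=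
  ∀ (n : Int), Dom_odd_dig_primes n → Pre_odd_dig_primes n →
    Spec_odd_dig_primes n (odd_dig_primes n)

-- ===== LEMMAS AND PROOFS =====

-- Nat.toDigits plumbing ------------------------------------------------------

theorem pvCoreAcc (f : Nat) : ∀ (n : Nat) (acc : List Char),
    Nat.toDigitsCore 10 f n acc = Nat.toDigitsCore 10 f n [] ++ acc := by
  induction f with
  | zero => intro n acc; simp [Nat.toDigitsCore]
  | succ f ih =>
    intro n acc
    simp only [Nat.toDigitsCore]
    by_cases h : n / 10 = 0
    · simp [h]
    · simp only [h, if_false]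
      rw [ih (n / 10) ((n % 10).digitChar :: acc), ih (n / 10) [(n % 10).digitChar]]
      simp

theorem pvCoreFuel (f1 : Nat) : ∀ (f2 n : Nat) (acc : List Char), n < f1 → n < f2 →
    Nat.toDigitsCore 10 f1 n acc = Nat.toDigitsCore 10 f2 n acc := by
  induction f1 with
  | zero => intro f2 n acc h1 _; omega
  | succ f1 ih =>
    intro f2 n acc h1 h2
    match f2 with
    | 0 => omega
    | f2 + 1 =>
      simp only [Nat.toDigitsCore]
      by_cases h : n / 10 = 0
      · simp [h]
      · simp only [h, if_false]
        exact ih f2 (n / 10) _ (by omega) (by omega)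

theorem pvCoreSucc (f n : Nat) (acc : List Char) :
    Nat.toDigitsCore 10 (f + 1) n acc =
      if n / 10 = 0 then (n % 10).digitChar :: acc
      else Nat.toDigitsCore 10 f (n / 10) ((n % 10).digitChar :: acc) := rfl

theorem pvToDigitsUnfold (n : Nat) :
    Nat.toDigits 10 n =
      (if n < 10 then [] else Nat.toDigits 10 (n / 10)) ++ [Nat.digitChar (n % 10)] := by
  by_cases h : n < 10
  · show Nat.toDigitsCore 10 (n + 1) n [] = _
    rw [pvCoreSucc, if_pos (by omega)]
    simp [h]
  · show Nat.toDigitsCore 10 (n + 1) n [] = _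
    rw [pvCoreSucc, if_neg (by omega), if_neg h, pvCoreAcc,
      pvCoreFuel n (n / 10 + 1) (n / 10) [] (by omega) (by omega)]
    rfl

theorem pvDigitsMem (n : Nat) : ∀ c ∈ Nat.toDigits 10 n, ∃ d, d < 10 ∧ c = Nat.digitChar d := by
  induction n using Nat.strong_induction_on with
  | _ n ih =>
    intro c hc
    rw [pvToDigitsUnfold] at hc
    rcases List.mem_append.1 hc with h | h
    · by_cases hn : n < 10
      · simp [hn] at h
      · simp only [hn, if_false] at h
        exact ih (n / 10) (by omega) c h
    · simp at h
      exact ⟨n % 10, by omega, h⟩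

-- per-digit facts ------------------------------------------------------------

theorem pvDigitChar (d : Nat) (hd : d < 10) :
    (!(PySem.Int.mod ((PySem.Int.ofChars? [Nat.digitChar d]).getD 0) 2 == 0))
      = (['1', '3', '5', '7', '9'].contains (Nat.digitChar d)) := by
  interval_cases d <;> decide

theorem pvDigitCharOdd (d : Nat) (hd : d < 10)
    (h : (['1', '3', '5', '7', '9'].contains (Nat.digitChar d)) = true) : d % 2 = 1 := by
  interval_cases d <;> revert h <;> decide

theorem pvGoEqAll (cs : List Char) :
    pvAllOddsGoA cs
      = cs.all (fun c => !(PySem.Int.mod ((PySem.Int.ofChars? [c]).getD 0) 2 == 0)) := by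
  induction cs with
  | nil => rfl
  | cons c cs ih =>
    simp only [pvAllOddsGoA, List.all_cons, ← ih]
    cases h : PySem.Int.mod ((PySem.Int.ofChars? [c]).getD 0) 2 == 0 <;> simp

theorem pvAllCongrAux (p q : Char → Bool) (l : List Char) (h : ∀ c ∈ l, p c = q c) :
    l.all p = l.all q := by
  induction l with
  | nil => rfl
  | cons c cs ih =>
    simp only [List.all_cons, h c List.mem_cons_self,
      ih (fun x hx => h x (List.mem_cons_of_mem c hx))]

theorem pvAllEq (k : Int) (hk : 1 ≤ k) : pvIsAllOddsA k = pvIsAllOddsB k := by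
  have hneg : ¬ k < 0 := by omega
  simp only [pvIsAllOddsA, pvIsAllOddsB, PySem.Int.toChars, hneg, if_false, pvGoEqAll]
  apply pvAllCongrAux
  intro c hc
  obtain ⟨d, hd, rfl⟩ := pvDigitsMem k.toNat c hc
  exact pvDigitChar d hd

theorem pvParity (k : Int) (hk : 1 ≤ k) (h : pvIsAllOddsB k = true) : k % 2 = 1 := by
  have hneg : ¬ k < 0 := by omega
  simp only [pvIsAllOddsB, PySem.Int.toChars, hneg, if_false] at h
  rw [pvToDigitsUnfold, List.all_append] at h
  simp only [Bool.and_eq_true, List.all_cons, List.all_nil, Bool.and_true] at h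
  have := pvDigitCharOdd (k.toNat % 10) (by omega) h.2
  omega

-- trial-division loop characterizations --------------------------------------

theorem pvLoopACharacter (f : Nat) : ∀ (k i : Int), 1 ≤ i → k + 2 ≤ i + (f : Int) →
    (pvIsPrimeLoopA k i f = true ↔ ∀ d : Int, i ≤ d → d * d ≤ k → ¬ d ∣ k) := by
  induction f with
  | zero =>
    intro k i hi hf
    simp only [pvIsPrimeLoopA, true_iff]
    intro d hd hdd
    have : d ≤ d * d := le_mul_of_one_le_left (by omega) (by omega)
    omega
  | succ f ih =>
    intro k i hi hf
    simp only [pvIsPrimeLoopA]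
    by_cases hsq : i * i ≤ k
    · rw [if_pos hsq]
      by_cases hmod : (PySem.Int.mod k i == 0) = true
      · rw [if_pos hmod]
        simp only [Bool.false_eq_true, false_iff]
        intro hAll
        exact hAll i le_rfl hsq ((PySem.Int.mod_eq_zero_iff_dvd k i).1 (by simpa using hmod))
      · rw [if_neg hmod, ih k (i + 1) (by omega) (by push_cast at hf ⊢; omega)]
        constructor
        · intro h d hd hdd hdvd
          rcases eq_or_lt_of_le hd with rfl | hlt
          · exact absurd ((PySem.Int.mod_eq_zero_iff_dvd k i).2 hdvd) (by simpa using hmod)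
          · exact h d (by omega) hdd hdvd
        · intro h d hd hdd hdvd
          exact h d (by omega) hdd hdvd
    · rw [if_neg hsq]
      simp only [true_iff]
      intro d hd hdd hdvd
      have : i * i ≤ d * d := mul_le_mul hd hd (by omega) (by omega)
      omega

theorem pvLoopBCharacter (f : Nat) : ∀ (k i : Int), 3 ≤ i → i % 2 = 1 →
    k + 2 ≤ i + 2 * (f : Int) →
    (pvOddFacLoopB k i f = true ↔
      ∀ d : Int, i ≤ d → d % 2 = 1 → d * d ≤ k → ¬ d ∣ k) := by
  induction f with
  | zero =>
    intro k i hi _ hf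
    simp only [pvOddFacLoopB, true_iff]
    intro d hd _ hdd
    have : d ≤ d * d := le_mul_of_one_le_left (by omega) (by omega)
    omega
  | succ f ih =>
    intro k i hi hodd hf
    simp only [pvOddFacLoopB]
    by_cases hsq : i * i ≤ k
    · rw [if_pos hsq]
      by_cases hmod : (PySem.Int.mod k i == 0) = true
      · rw [if_pos hmod]
        simp only [Bool.false_eq_true, false_iff]
        intro hAll
        exact hAll i le_rfl hodd hsq
          ((PySem.Int.mod_eq_zero_iff_dvd k i).1 (by simpa using hmod))
      · rw [if_neg hmod, ih k (i + 2) (by omega) (by omega)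
          (by push_cast at hf ⊢; omega)]
        constructor
        · intro h d hd hdo hdd hdvd
          rcases eq_or_lt_of_le hd with rfl | hlt
          · exact absurd ((PySem.Int.mod_eq_zero_iff_dvd k i).2 hdvd) (by simpa using hmod)
          · exact h d (by omega) hdo hdd hdvd
        · intro h d hd hdo hdd hdvd
          exact h d (by omega) hdo hdd hdvd
    · rw [if_neg hsq]
      simp only [true_iff]
      intro d hd _ hdd hdvd
      have : i * i ≤ d * d := mul_le_mul hd hd (by omega) (by omega)
      omega

theorem pvBridge (k : Int) (_hk : 3 ≤ k) (hodd : k % 2 = 1) :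
    (∀ d : Int, 2 ≤ d → d * d ≤ k → ¬ d ∣ k) ↔
    (∀ d : Int, 3 ≤ d → d % 2 = 1 → d * d ≤ k → ¬ d ∣ k) := by
  constructor
  · intro h d hd _ hdd
    exact h d (by omega) hdd
  · intro h d hd hdd hdvd
    by_cases hpar : d % 2 = 0
    · have h2 : (2 : Int) ∣ d := by omega
      have : (2 : Int) ∣ k := h2.trans hdvd
      omega
    · exact h d (by omega) (by omega) hdd hdvd

-- the two per-number predicates agree ----------------------------------------

theorem pvPredEq (k : Int) (hk2 : 2 ≤ k) :
    (pvIsPrimeA k && pvIsAllOddsA k) = pvIsPodpB k := by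
  rcases eq_or_lt_of_le hk2 with rfl | hk3
  · decide
  · have hk3 : 3 ≤ k := hk3
    have hnotlt : ¬ k < 3 := by omega
    have hall := pvAllEq k (by omega)
    simp only [pvIsPodpB, hnotlt, if_false]
    by_cases hB : pvIsAllOddsB k
    · simp only [hB, Bool.not_true, Bool.false_eq_true, if_false]
      have hA : pvIsAllOddsA k = true := by rw [hall]; exact hB
      rw [hA, Bool.and_true]
      have hparity : k % 2 = 1 := pvParity k (by omega) hB
      have hAchar := pvLoopACharacter (k.toNat + 1) k 2 (by omega) (by push_cast; omega)
      have hBchar := pvLoopBCharacter (k.toNat + 1) k 3 (by omega) (by decide)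
        (by push_cast; omega)
      have hiff : pvIsPrimeLoopA k 2 (k.toNat + 1) = true ↔
          pvOddFacLoopB k 3 (k.toNat + 1) = true := by
        rw [hAchar, hBchar]
        exact pvBridge k hk3 hparity
      simp only [pvIsPrimeA, show ¬ k < 2 by omega, if_false]
      cases h1 : pvIsPrimeLoopA k 2 (k.toNat + 1) <;>
        cases h2 : pvOddFacLoopB k 3 (k.toNat + 1) <;> simp_all
    · have hB' : pvIsAllOddsB k = false := by simpa using hB
      have hA : pvIsAllOddsA k = false := by rw [hall]; exact hB'
      simp [hA, hB']

-- the fused fold of B = A's counter fold × A's last-hit fold ------------------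

theorem pvFoldPair (xs : List Int) (hxs : ∀ x ∈ xs, 2 ≤ x) : ∀ (c b : Int),
    xs.foldl (fun (p : Int × Int) i => if pvIsPodpB i then (p.1 + 1, i) else p) (c, b)
      = (xs.foldl (fun c i => if pvIsPrimeA i && pvIsAllOddsA i then c + 1 else c) c,
         xs.foldl (fun a x => if pvIsPrimeA x && pvIsAllOddsA x then x else a) b) := by
  induction xs with
  | nil => intro c b; rfl
  | cons x xs ih =>
    intro c b
    have hx : 2 ≤ x := hxs x (List.mem_cons_self)
    have hxs' : ∀ y ∈ xs, 2 ≤ y := fun y hy => hxs y (List.mem_cons_of_mem x hy)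
    simp only [List.foldl_cons, ← pvPredEq x hx]
    by_cases h : (pvIsPrimeA x && pvIsAllOddsA x) = true
    · simp only [h, if_true]; exact ih hxs' (c + 1) x
    · simp only [h]; exact ih hxs' c b

-- downward search ------------------------------------------------------------

theorem pvBelow (m : Int) (hm : 3 ≤ m) : ∀ (f : Nat), m ≤ 2 + (f : Int) →
    (PySem.List.pyRange 2 (m + 1) 1).foldl
        (fun a x => if pvIsPrimeA x && pvIsAllOddsA x then x else a) 0
      = pvSearchDownA f m := by
  induction m, hm using Int.le_induction with
  | base =>
    intro f hf
    match f with
    | 0 => omega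
    | f + 1 =>
      rw [show PySem.List.pyRange 2 (3 + 1) 1 = [2, 3] by decide]
      simp only [pvSearchDownA, List.foldl_cons, List.foldl_nil,
        show (pvIsPrimeA 2 && pvIsAllOddsA 2) = false by decide,
        show (pvIsPrimeA 3 && pvIsAllOddsA 3) = true by decide,
        Bool.false_eq_true, if_false, if_true]
  | succ m hm ih =>
    intro f hf
    rw [show m + 1 + 1 = (m + 1) + 1 from rfl,
      PySem.List.pyRange_one_succ_right (by omega : (2 : Int) ≤ m + 1),
      List.foldl_append]
    match f with
    | 0 => omega
    | f + 1 =>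
      simp only [pvSearchDownA, List.foldl_cons, List.foldl_nil]
      by_cases hp : (pvIsPrimeA (m + 1) && pvIsAllOddsA (m + 1)) = true
      · rw [if_pos hp, if_pos hp]
      · rw [if_neg hp, if_neg hp, show m + 1 - 1 = m from by ring]
        exact ih f (by push_cast at hf ⊢; omega)

-- upward search --------------------------------------------------------------

theorem pvAbove (f : Nat) : ∀ (a : Int), 3 ≤ a → pvSearchUpA f a = pvSearchUpB f a := by
  induction f with
  | zero => intro a _; rfl
  | succ f ih =>
    intro a ha
    simp only [pvSearchUpA, pvSearchUpB, pvPredEq a (by omega)]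
    by_cases hp : pvIsPodpB a = true
    · simp [hp]
    · simp only [hp]
      exact ih (a + 1) (by omega)

-- ===== VERDICT (by name: the statement is the Claim_ definition above) =====
theorem odd_dig_primes_spec : Claim_equal_odd_dig_primes := by
  intro n _ hpre
  unfold Pre_odd_dig_primes at hpre
  unfold Spec_odd_dig_primes odd_dig_primes odd_dig_primes_alt
  have hmem : ∀ x ∈ PySem.List.pyRange 2 (n + 1) 1, 2 ≤ x := by
    intro x hx
    exact ((PySem.List.mem_pyRange_one).1 hx).1
  rw [pvFoldPair _ hmem 0 0]
  simp only [pvPodpCounterA]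
  rw [pvBelow n hpre (n.toNat + 1) (by push_cast; omega),
    pvAbove 8589934592 (n + 1) (by omega)]
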